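-- pv_equiv track=rewrite | github.com/JFincher42/AOC2018 | day13/day13.py | check_last_car
-- ===== SOURCE A (Python) =====
-- def check_last_car(cars):
--     remaining_cars = len(cars) - sum([1 for car in cars if car[3] == "*"])
--     if remaining_cars == 1:
--         for i in range(len(cars)):
--             if cars[i][3] != "*":
--                 return i
--     else:
--         return -1
-- ===== SOURCE B (Python) =====
-- def check_last_car(cars):
--     # One pass: collect indices of surviving (non-"*") cars, then gate on exactly one.
--     hits = [i for i, car in enumerate(cars) if car[3] != "*"]
--     return hits[0] if len(hits) == 1 else -1
-- ===== Notes on version B (the rewrite author's own statement) =====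
-- stated objective: simpler
-- what changed: A counts survivors with a filtered 0/1 sum and then re-scans by index for the first survivor; B makes one enumerate pass materializing the survivor indices and returns the sole element if the list is a singleton, else -1.
import Mathlib
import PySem

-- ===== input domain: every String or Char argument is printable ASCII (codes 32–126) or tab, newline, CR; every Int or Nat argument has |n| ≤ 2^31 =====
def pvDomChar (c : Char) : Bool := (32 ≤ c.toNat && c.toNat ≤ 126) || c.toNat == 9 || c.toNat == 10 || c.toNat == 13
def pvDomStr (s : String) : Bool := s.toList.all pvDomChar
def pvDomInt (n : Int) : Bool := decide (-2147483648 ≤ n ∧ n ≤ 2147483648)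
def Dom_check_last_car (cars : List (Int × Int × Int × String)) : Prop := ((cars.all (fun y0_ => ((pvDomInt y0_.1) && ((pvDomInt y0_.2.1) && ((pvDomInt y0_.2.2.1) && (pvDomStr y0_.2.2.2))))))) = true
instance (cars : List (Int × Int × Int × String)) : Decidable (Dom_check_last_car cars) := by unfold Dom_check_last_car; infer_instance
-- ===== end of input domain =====

-- B replaces A's count-then-rescan (filtered 0/1 sum, then an index loop) with a single
-- enumerate pass collecting survivor indices and a singleton check: simpler decomposition.


-- ===== PORT A =====
-- 'for i in range(len(cars)): if cars[i][3] != "*": return i' — returns the first such i;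
-- none = fell off the loop (Python would return None; unreachable under the remaining == 1 guard).
def aLoop (cars : List (Int × Int × Int × String)) : List Int → Option Int
  | [] => none
  | i :: rest =>
    match PySem.List.pyGet? cars i with
    | some car => if car.2.2.2 ≠ "*" then some i else aLoop cars rest
    | none => none  -- IndexError: unreachable, i ∈ range(len(cars))

def check_last_car (cars : List (Int × Int × Int × String)) : Int :=
  -- remaining_cars = len(cars) - sum([1 for car in cars if car[3] == "*"])
  let remaining : Int :=
    (cars.length : Int) - ((cars.filter (fun car => car.2.2.2 == "*")).map (fun _ => (1 : Int))).sum
  if remaining = 1 then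
    (aLoop cars (PySem.List.pyRange 0 (cars.length : Int) 1)).getD (-1)  -- getD unreachable (see aLoop)
  else -1

-- ===== PORT B =====
-- hits = [i for i, car in enumerate(cars) if car[3] != "*"]
def bHits (i : Int) : List (Int × Int × Int × String) → List Int
  | [] => []
  | car :: rest => if car.2.2.2 ≠ "*" then i :: bHits (i + 1) rest else bHits (i + 1) rest

def check_last_car_alt (cars : List (Int × Int × Int × String)) : Int :=
  match bHits 0 cars with
  | [i] => i
  | _ => -1

-- ===== PRECONDITION & SPEC =====
def Spec_check_last_car (cars : List (Int × Int × Int × String)) (out : Int) : Prop := out = check_last_car_alt cars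
instance (cars : List (Int × Int × Int × String)) (out : Int) : Decidable (Spec_check_last_car cars out) := by unfold Spec_check_last_car; infer_instance

-- ===== CLAIM (what is proved, stated in full; the proofs are below) =====
def Claim_equal_check_last_car : Prop := ∀ (cars : List (Int × Int × Int × String)), Dom_check_last_car cars → Spec_check_last_car cars (check_last_car cars)

-- ===== LEMMAS AND PROOFS =====

-- B's hit list has as many elements as there are non-"*" cars, whatever the start index.
theorem bHits_length (cars : List (Int × Int × Int × String)) :
    ∀ i : Int, (bHits i cars).length = cars.countP (fun car => !(car.2.2.2 == "*")) := by
  induction cars with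
  | nil => intro i; simp [bHits]
  | cons c rest ih =>
    intro i
    by_cases h : c.2.2.2 = "*" <;> simp [bHits, h, ih]

theorem sum_map_one (l : List (Int × Int × Int × String)) :
    (l.map (fun _ => (1 : Int))).sum = (l.length : Int) := by
  induction l with
  | nil => simp
  | cons c rest ih => simp; omega

-- A's "remaining" count is the length of B's hit list.
theorem remaining_eq (cars : List (Int × Int × Int × String)) :
    (cars.length : Int) - ((cars.filter (fun car => car.2.2.2 == "*")).map (fun _ => (1 : Int))).sum
      = ((bHits 0 cars).length : Int) := by
  rw [bHits_length, sum_map_one]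
  induction cars with
  | nil => simp
  | cons c rest ih =>
    by_cases h : c.2.2.2 = "*" <;>
      simp [h] <;> omega

-- A's index loop over range(pre.length, len) finds the head of B's hit list for the suffix.
theorem aLoop_eq_head (suf : List (Int × Int × Int × String)) :
    ∀ pre : List (Int × Int × Int × String),
      aLoop (pre ++ suf) (PySem.List.pyRange (pre.length : Int) ((pre ++ suf).length : Int) 1)
        = (bHits (pre.length : Int) suf).head? := by
  induction suf with
  | nil =>
    intro pre
    rw [PySem.List.pyRange_one_eq_nil (by simp)]
    simp [aLoop, bHits]
  | cons c rest ih =>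
    intro pre
    have hlt : (pre.length : Int) < ((pre ++ c :: rest).length : Int) := by
      simp
    rw [PySem.List.pyRange_one_cons hlt]
    simp only [aLoop, PySem.List.pyGet?_append_length]
    by_cases h : c.2.2.2 = "*"
    · have := ih (pre ++ [c])
      simp [bHits, h]
      simp only [List.append_assoc, List.cons_append, List.nil_append, List.length_append,
        List.length_cons, List.length_nil] at this
      push_cast at this ⊢
      ring_nf at this ⊢
      exact this
    · simp [bHits, h]

theorem aLoop_eq_head_zero (cars : List (Int × Int × Int × String)) :
    aLoop cars (PySem.List.pyRange 0 (cars.length : Int) 1) = (bHits 0 cars).head? := by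
  simpa using aLoop_eq_head cars []

-- ===== VERDICT (by name: the statement is the Claim_ definition above) =====
theorem check_last_car_spec : Claim_equal_check_last_car := by
  intro cars _
  unfold Spec_check_last_car check_last_car check_last_car_alt
  rw [remaining_eq, aLoop_eq_head_zero]
  match h : bHits 0 cars with
  | [] => simp
  | [i] => simp
  | i :: j :: t => simp; omega
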